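-- pv_equiv track=rewrite | github.com/taurinrobinson-wq/saoriverse-console | velinor/engine/npc_system.py | adapt_for_multiplayer
-- ===== SOURCE A (Python) =====
-- def adapt_for_multiplayer(dialogue: str, group_size: int) -> str:
--     """Adapt dialogue for group play."""
--     if group_size == 1:
--         return dialogue
--
--     # Shift pronouns and emphasis for group
--     multiplayer_adapts = {
--         "You steady": "Together, you steady",
--         "Your resolve": "Your collective resolve",
--         "You feel": "You all feel",
--         "Your courage": "Your shared courage",
--     }
--
--     adapted = dialogue
--     for solo, group in multiplayer_adapts.items():
--         adapted = adapted.replace(solo, group)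
--
--     return adapted
-- ===== SOURCE B (Python) =====
-- def adapt_for_multiplayer(dialogue: str, group_size: int) -> str:
--     """Adapt dialogue for group play (single left-to-right scan)."""
--     if group_size == 1:
--         return dialogue
--
--     multiplayer_adapts = [
--         ("You steady", "Together, you steady"),
--         ("Your resolve", "Your collective resolve"),
--         ("You feel", "You all feel"),
--         ("Your courage", "Your shared courage"),
--     ]
--
--     pieces = []
--     i = 0
--     n = len(dialogue)
--     while i < n:
--         for solo, group in multiplayer_adapts:
--             if dialogue.startswith(solo, i):
--                 pieces.append(group)
--                 i += len(solo)
--                 break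
--         else:
--             pieces.append(dialogue[i])
--             i += 1
--     return "".join(pieces)
-- ===== Notes on version B (the rewrite author's own statement) =====
-- stated objective: alternative
-- what changed: Replaces four sequential full-string str.replace passes with one left-to-right scan that tries the four keys at each position and emits the replacement in a single pass; correct because no key occurs inside another key or inside any replacement value.
import Mathlib
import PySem

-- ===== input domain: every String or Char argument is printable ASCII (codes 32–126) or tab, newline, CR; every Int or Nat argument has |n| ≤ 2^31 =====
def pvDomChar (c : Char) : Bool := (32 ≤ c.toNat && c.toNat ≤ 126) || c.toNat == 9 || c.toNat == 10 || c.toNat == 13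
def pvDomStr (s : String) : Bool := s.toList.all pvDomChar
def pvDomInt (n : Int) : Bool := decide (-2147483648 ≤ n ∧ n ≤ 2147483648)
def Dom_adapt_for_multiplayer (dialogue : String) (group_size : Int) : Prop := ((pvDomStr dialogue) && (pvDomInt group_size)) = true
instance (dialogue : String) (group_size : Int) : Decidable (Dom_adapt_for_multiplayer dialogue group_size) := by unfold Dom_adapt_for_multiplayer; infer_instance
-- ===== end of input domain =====

-- B replaces A's four sequential full-string str.replace passes by ONE left-to-right scan
-- that tries the four keys at each position (objective: alternative single-pass algorithm).

-- ===== PORT A =====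
def adapt_for_multiplayer (dialogue : String) (group_size : Int) : String :=
  if group_size == 1 then dialogue
  else
    let multiplayer_adapts : List (String × String) :=
      [("You steady", "Together, you steady"),
       ("Your resolve", "Your collective resolve"),
       ("You feel", "You all feel"),
       ("Your courage", "Your shared courage")]
    multiplayer_adapts.foldl (fun adapted p => PySem.Str.replace adapted p.1 p.2) dialogue

-- ===== PORT B =====
-- B's key/value table, as lists of code points (same four pairs, same order).
def pvK1 : List Char := ['Y', 'o', 'u', ' ', 's', 't', 'e', 'a', 'd', 'y']
def pvV1 : List Char := ['T', 'o', 'g', 'e', 't', 'h', 'e', 'r', ',', ' ', 'y', 'o', 'u', ' ', 's', 't', 'e', 'a', 'd', 'y']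
def pvK2 : List Char := ['Y', 'o', 'u', 'r', ' ', 'r', 'e', 's', 'o', 'l', 'v', 'e']
def pvV2 : List Char := ['Y', 'o', 'u', 'r', ' ', 'c', 'o', 'l', 'l', 'e', 'c', 't', 'i', 'v', 'e', ' ', 'r', 'e', 's', 'o', 'l', 'v', 'e']
def pvK3 : List Char := ['Y', 'o', 'u', ' ', 'f', 'e', 'e', 'l']
def pvV3 : List Char := ['Y', 'o', 'u', ' ', 'a', 'l', 'l', ' ', 'f', 'e', 'e', 'l']
def pvK4 : List Char := ['Y', 'o', 'u', 'r', ' ', 'c', 'o', 'u', 'r', 'a', 'g', 'e']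
def pvV4 : List Char := ['Y', 'o', 'u', 'r', ' ', 's', 'h', 'a', 'r', 'e', 'd', ' ', 'c', 'o', 'u', 'r', 'a', 'g', 'e']
def pvPairs : List (List Char × List Char) := [(pvK1, pvV1), (pvK2, pvV2), (pvK3, pvV3), (pvK4, pvV4)]

-- B's inner for-loop: first pair whose key starts at the current position (the replacement and the key length).
def pvFind : List (List Char × List Char) → List Char → Option (List Char × Nat)
  | [], _ => none
  | (k, v) :: rest, l => if k.isPrefixOf l then some (v, k.length) else pvFind rest l

-- B's while-loop: one left-to-right scan emitting replacements or the current character.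
def pvScan : List Char → List Char
  | [] => []
  | c :: t =>
    match pvFind pvPairs (c :: t) with
    | some (v, klen) => v ++ pvScan (List.drop (klen - 1) t)
    | none => c :: pvScan t
termination_by s => s.length
decreasing_by all_goals simp [List.length_drop]

def adapt_for_multiplayer_alt (dialogue : String) (group_size : Int) : String :=
  if group_size == 1 then dialogue
  else String.ofList (pvScan dialogue.toList)

-- ===== PRECONDITION & SPEC =====
def Spec_adapt_for_multiplayer (dialogue : String) (group_size : Int) (out : String) : Prop := out = adapt_for_multiplayer_alt dialogue group_size
instance (dialogue : String) (group_size : Int) (out : String) : Decidable (Spec_adapt_for_multiplayer dialogue group_size out) := by unfold Spec_adapt_for_multiplayer; infer_instance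

-- ===== CLAIM (what is proved, stated in full; the proofs are below) =====
def Claim_equal_adapt_for_multiplayer : Prop := ∀ (dialogue : String) (group_size : Int), Dom_adapt_for_multiplayer dialogue group_size → Spec_adapt_for_multiplayer dialogue group_size (adapt_for_multiplayer dialogue group_size)

-- ===== LEMMAS AND PROOFS =====

-- A clean structural model of CPython str.replace (for a nonempty pattern k).
def pvRep (k v : List Char) : List Char → List Char
  | [] => []
  | c :: t => if k.isPrefixOf (c :: t) then v ++ pvRep k v (List.drop (k.length - 1) t) else c :: pvRep k v t
termination_by s => s.length
decreasing_by all_goals simp [List.length_drop]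

lemma pv_go_eq (k v : List Char) (hk : k ≠ []) :
    ∀ (fuel : Nat) (l acc : List Char), l.length ≤ fuel →
      PySem.Chars.replace.go k v fuel l acc = acc.reverse ++ pvRep k v l := by
  intro fuel
  induction fuel with
  | zero =>
    intro l acc h
    have hl : l = [] := List.length_eq_zero_iff.mp (Nat.le_zero.mp h)
    subst hl
    rw [PySem.Chars.replace.go, pvRep]
  | succ n ih =>
    intro l acc h
    cases l with
    | nil => rw [PySem.Chars.replace.go, pvRep]; simp; omega
    | cons c t =>
      obtain ⟨d, k', rfl⟩ : ∃ d k', k = d :: k' := by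
        cases k with
        | nil => exact absurd rfl hk
        | cons d k' => exact ⟨d, k', rfl⟩
      rw [PySem.Chars.replace.go]
      by_cases hp : (d :: k').isPrefixOf (c :: t) = true
      · rw [if_pos hp, pvRep, if_pos hp]
        have hlen : (List.drop (d :: k').length (c :: t)).length ≤ n := by
          simp only [List.length_drop, List.length_cons] at *
          omega
        rw [ih _ _ hlen]
        simp only [List.length_cons, Nat.add_sub_cancel, List.drop_succ_cons,
          List.reverse_append, List.reverse_reverse, List.append_assoc]
      · rw [if_neg hp, pvRep, if_neg hp]
        have hlen : t.length ≤ n := by simpa using h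
        rw [ih _ _ hlen]
        simp

lemma pv_replace_eq (k v l : List Char) (hk : k ≠ []) :
    PySem.Chars.replace l k v = pvRep k v l := by
  rw [PySem.Chars.replace, if_neg (by simp [List.isEmpty_iff, hk]),
    pv_go_eq k v hk l.length l [] le_rfl]
  simp

-- "no occurrence of k starts inside a" (with a mismatch witnessed inside a itself).
def pvNoStart (k a : List Char) : Bool :=
  (List.range a.length).all fun i =>
    (List.range k.length).any fun j => decide (i + j < a.length) && decide (a[i+j]? ≠ k[j]?)

lemma pvNoStart_iff (k a : List Char) :
    pvNoStart k a = true ↔ ∀ i < a.length, ∃ j < k.length, i + j < a.length ∧ a[i+j]? ≠ k[j]? := by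
  simp [pvNoStart, List.all_eq_true, List.any_eq_true, List.mem_range]

-- every position of k' except 0 differs from the first character of v.
def pvC1 (k' v : List Char) : Bool :=
  (List.range k'.length).all fun q => decide (q = 0) || decide (k'[q]? ≠ v[0]?)

lemma pv_mismatch {a b : List Char} (j : Nat) (ha : j < a.length) (hb : j < b.length)
    (hne : a[j]? ≠ b[j]?) (X : List Char) : ¬ a <+: b ++ X := by
  rintro ⟨r, hr⟩
  apply hne
  calc a[j]? = (a ++ r)[j]? := (List.getElem?_append_left ha).symm
    _ = (b ++ X)[j]? := by rw [hr]
    _ = b[j]? := List.getElem?_append_left hb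

lemma pv_dist (k v : List Char) :
    ∀ (a X : List Char), pvNoStart k a = true → pvRep k v (a ++ X) = a ++ pvRep k v X := by
  intro a
  induction a with
  | nil => intro X _; simp
  | cons c a' ih =>
    intro X h
    rw [pvNoStart_iff] at h
    have h0 : ¬ k <+: (c :: a') ++ X := by
      obtain ⟨j, hj, hlt, hne⟩ := h 0 (by simp)
      simp only [Nat.zero_add] at hlt hne
      exact pv_mismatch j hj hlt (fun e => hne e.symm) X
    have h' : pvNoStart k a' = true := by
      rw [pvNoStart_iff]
      intro i hi
      obtain ⟨j, hj, hlt, hne⟩ := h (i + 1) (by simp; omega)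
      refine ⟨j, hj, by simp at hlt ⊢; omega, ?_⟩
      have e : (c :: a')[i + 1 + j]? = a'[i + j]? := by
        rw [show i + 1 + j = (i + j) + 1 by omega]
        simp
      rwa [e] at hne
    rw [List.cons_append, pvRep, if_neg (by simpa [List.isPrefixOf_iff_prefix] using h0), ih X h']
    rfl

lemma pv_match (k v X : List Char) (hk : k ≠ []) :
    pvRep k v (k ++ X) = v ++ pvRep k v X := by
  obtain ⟨d, k', rfl⟩ : ∃ d k', k = d :: k' := by
    cases k with
    | nil => exact absurd rfl hk
    | cons d k' => exact ⟨d, k', rfl⟩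
  rw [List.cons_append, pvRep,
    if_pos (show (d :: k').isPrefixOf (d :: (k' ++ X)) = true from
      List.isPrefixOf_iff_prefix.mpr (List.prefix_append (d :: k') X))]
  simp

lemma pv_cons {k : List Char} (v : List Char) {c : Char} {t : List Char} (h : ¬ k <+: (c :: t)) :
    pvRep k v (c :: t) = c :: pvRep k v t := by
  rw [pvRep, if_neg (by simpa [List.isPrefixOf_iff_prefix] using h)]

lemma pv_pull (k v k' : List Char) (hk : k ≠ []) (hv : v ≠ []) (hC : pvC1 k' v = true) :
    ∀ (n : Nat) (s : List Char) (q : Nat), s.length ≤ n → q < k'.length →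
      (q = 0 → ¬ k <+: s) → List.drop q k' <+: pvRep k v s → List.drop q k' <+: s := by
  intro n
  induction n with
  | zero =>
    intro s q hs hq h0 hpre
    have : s = [] := List.length_eq_zero_iff.mp (Nat.le_zero.mp hs)
    subst this
    simpa [pvRep] using hpre
  | succ n ih =>
    intro s q hs hq h0 hpre
    by_cases hp : k <+: s
    · have hq0 : q ≠ 0 := fun e => (h0 e) hp
      obtain ⟨X, rfl⟩ := hp
      rw [pv_match k v X hk] at hpre
      exfalso
      obtain ⟨r2, hr2⟩ := hpre
      have hv0 : 0 < v.length := by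
        cases v with
        | nil => exact absurd rfl hv
        | cons a b => simp
      have h1 : ((List.drop q k') ++ r2)[0]? = (List.drop q k')[0]? :=
        List.getElem?_append_left (by simp; omega)
      have h2 : (v ++ pvRep k v X)[0]? = v[0]? := List.getElem?_append_left hv0
      have hC' : k'[q]? ≠ v[0]? := by
        have := (List.all_eq_true.mp hC) q (by simpa [List.mem_range] using hq)
        simpa [hq0] using this
      apply hC'
      calc k'[q]? = (List.drop q k')[0]? := by simp [List.getElem?_drop]
        _ = (v ++ pvRep k v X)[0]? := by rw [← h1, hr2]
        _ = v[0]? := h2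
    · cases s with
      | nil => simpa [pvRep] using hpre
      | cons c t =>
        rw [pv_cons v hp] at hpre
        rw [← List.getElem_cons_drop hq] at hpre ⊢
        rw [List.cons_prefix_cons] at hpre ⊢
        obtain ⟨hc, hpre'⟩ := hpre
        refine ⟨hc, ?_⟩
        by_cases hq1 : q + 1 < k'.length
        · exact ih t (q + 1) (by simpa using hs) hq1 (by omega) hpre'
        · have e : List.drop (q + 1) k' = [] := List.drop_eq_nil_of_le (by omega)
          simp [e]

lemma pv_nmp {k v k' s : List Char} (hk : k ≠ []) (hv : v ≠ []) (hk' : k' ≠ [])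
    (hC : pvC1 k' v = true) (h1 : ¬ k <+: s) (h2 : ¬ k' <+: s) : ¬ k' <+: pvRep k v s := by
  intro h
  apply h2
  have hk'0 : 0 < k'.length := by
    cases k' with
    | nil => exact absurd rfl hk'
    | cons a b => simp
  have := pv_pull k v k' hk hv hC s.length s 0 le_rfl hk'0 (fun _ => h1) (by simpa using h)
  simpa using this

-- evaluation lemmas for pvScan at the four keys and at a non-matching head
lemma pvFind_k1 (t : List Char) : pvFind pvPairs (pvK1 ++ t) = some (pvV1, 10) := by
  simp [pvFind, pvPairs, pvK1]

lemma pvFind_k2 (t : List Char) : pvFind pvPairs (pvK2 ++ t) = some (pvV2, 12) := by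
  have m1 : ¬ pvK1 <+: pvK2 ++ t :=
    pv_mismatch 3 (by simp [pvK1]) (by simp [pvK2]) (by decide) t
  have m1' : ¬ pvK1 <+: 'Y' :: 'o' :: 'u' :: 'r' :: ' ' :: 'r' :: 'e' :: 's' :: 'o' :: 'l' :: 'v' :: 'e' :: t := m1
  simp [pvFind, pvPairs, m1', pvK2]

lemma pvFind_k3 (t : List Char) : pvFind pvPairs (pvK3 ++ t) = some (pvV3, 8) := by
  have m1 : ¬ pvK1 <+: pvK3 ++ t :=
    pv_mismatch 4 (by simp [pvK1]) (by simp [pvK3]) (by decide) t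
  have m2 : ¬ pvK2 <+: pvK3 ++ t :=
    pv_mismatch 3 (by simp [pvK2]) (by simp [pvK3]) (by decide) t
  have m1' : ¬ pvK1 <+: 'Y' :: 'o' :: 'u' :: ' ' :: 'f' :: 'e' :: 'e' :: 'l' :: t := m1
  have m2' : ¬ pvK2 <+: 'Y' :: 'o' :: 'u' :: ' ' :: 'f' :: 'e' :: 'e' :: 'l' :: t := m2
  simp [pvFind, pvPairs, m1', m2', pvK3]

lemma pvFind_k4 (t : List Char) : pvFind pvPairs (pvK4 ++ t) = some (pvV4, 12) := by
  have m1 : ¬ pvK1 <+: pvK4 ++ t :=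
    pv_mismatch 3 (by simp [pvK1]) (by simp [pvK4]) (by decide) t
  have m2 : ¬ pvK2 <+: pvK4 ++ t :=
    pv_mismatch 5 (by simp [pvK2]) (by simp [pvK4]) (by decide) t
  have m3 : ¬ pvK3 <+: pvK4 ++ t :=
    pv_mismatch 3 (by simp [pvK3]) (by simp [pvK4]) (by decide) t
  have m1' : ¬ pvK1 <+: 'Y' :: 'o' :: 'u' :: 'r' :: ' ' :: 'c' :: 'o' :: 'u' :: 'r' :: 'a' :: 'g' :: 'e' :: t := m1
  have m2' : ¬ pvK2 <+: 'Y' :: 'o' :: 'u' :: 'r' :: ' ' :: 'c' :: 'o' :: 'u' :: 'r' :: 'a' :: 'g' :: 'e' :: t := m2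
  have m3' : ¬ pvK3 <+: 'Y' :: 'o' :: 'u' :: 'r' :: ' ' :: 'c' :: 'o' :: 'u' :: 'r' :: 'a' :: 'g' :: 'e' :: t := m3
  simp [pvFind, pvPairs, m1', m2', m3', pvK4]

lemma pvFind_none {l : List Char} (h1 : ¬ pvK1 <+: l) (h2 : ¬ pvK2 <+: l)
    (h3 : ¬ pvK3 <+: l) (h4 : ¬ pvK4 <+: l) : pvFind pvPairs l = none := by
  simp [pvFind, pvPairs, List.isPrefixOf_iff_prefix, h1, h2, h3, h4]

lemma pvScan_cons (c : Char) (t : List Char) :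
    pvScan (c :: t) = match pvFind pvPairs (c :: t) with
      | some (v, klen) => v ++ pvScan (List.drop (klen - 1) t)
      | none => c :: pvScan t := by
  rw [pvScan]

lemma pvScan_k1 (t : List Char) : pvScan (pvK1 ++ t) = pvV1 ++ pvScan t := by
  have e : pvK1 ++ t = 'Y' :: (['o', 'u', ' ', 's', 't', 'e', 'a', 'd', 'y'] ++ t) := rfl
  rw [e, pvScan_cons, ← e, pvFind_k1]
  rfl

lemma pvScan_k2 (t : List Char) : pvScan (pvK2 ++ t) = pvV2 ++ pvScan t := by
  have e : pvK2 ++ t = 'Y' :: (['o', 'u', 'r', ' ', 'r', 'e', 's', 'o', 'l', 'v', 'e'] ++ t) := rfl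
  rw [e, pvScan_cons, ← e, pvFind_k2]
  rfl

lemma pvScan_k3 (t : List Char) : pvScan (pvK3 ++ t) = pvV3 ++ pvScan t := by
  have e : pvK3 ++ t = 'Y' :: (['o', 'u', ' ', 'f', 'e', 'e', 'l'] ++ t) := rfl
  rw [e, pvScan_cons, ← e, pvFind_k3]
  rfl

lemma pvScan_k4 (t : List Char) : pvScan (pvK4 ++ t) = pvV4 ++ pvScan t := by
  have e : pvK4 ++ t = 'Y' :: (['o', 'u', 'r', ' ', 'c', 'o', 'u', 'r', 'a', 'g', 'e'] ++ t) := rfl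
  rw [e, pvScan_cons, ← e, pvFind_k4]
  rfl

lemma pv_main (s : List Char) :
    pvRep pvK4 pvV4 (pvRep pvK3 pvV3 (pvRep pvK2 pvV2 (pvRep pvK1 pvV1 s))) = pvScan s := by
  suffices H : ∀ (n : Nat) (s : List Char), s.length ≤ n →
      pvRep pvK4 pvV4 (pvRep pvK3 pvV3 (pvRep pvK2 pvV2 (pvRep pvK1 pvV1 s))) = pvScan s from
    H s.length s le_rfl
  intro n
  induction n with
  | zero =>
    intro s hs
    have : s = [] := List.length_eq_zero_iff.mp (Nat.le_zero.mp hs)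
    subst this
    simp [pvRep, pvScan]
  | succ n ih =>
    intro s hs
    by_cases h1 : pvK1 <+: s
    · obtain ⟨t, rfl⟩ := h1
      rw [pv_match pvK1 pvV1 t (by decide),
        pv_dist pvK2 pvV2 pvV1 _ (by decide),
        pv_dist pvK3 pvV3 pvV1 _ (by decide),
        pv_dist pvK4 pvV4 pvV1 _ (by decide),
        pvScan_k1, ih t (by simp [pvK1] at hs; omega)]
    by_cases h2 : pvK2 <+: s
    · obtain ⟨t, rfl⟩ := h2
      rw [pv_dist pvK1 pvV1 pvK2 t (by decide),
        pv_match pvK2 pvV2 _ (by decide),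
        pv_dist pvK3 pvV3 pvV2 _ (by decide),
        pv_dist pvK4 pvV4 pvV2 _ (by decide),
        pvScan_k2, ih t (by simp [pvK2] at hs; omega)]
    by_cases h3 : pvK3 <+: s
    · obtain ⟨t, rfl⟩ := h3
      rw [pv_dist pvK1 pvV1 pvK3 t (by decide),
        pv_dist pvK2 pvV2 pvK3 _ (by decide),
        pv_match pvK3 pvV3 _ (by decide),
        pv_dist pvK4 pvV4 pvV3 _ (by decide),
        pvScan_k3, ih t (by simp [pvK3] at hs; omega)]
    by_cases h4 : pvK4 <+: s
    · obtain ⟨t, rfl⟩ := h4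
      rw [pv_dist pvK1 pvV1 pvK4 t (by decide),
        pv_dist pvK2 pvV2 pvK4 _ (by decide),
        pv_dist pvK3 pvV3 pvK4 _ (by decide),
        pv_match pvK4 pvV4 _ (by decide),
        pvScan_k4, ih t (by simp [pvK4] at hs; omega)]
    cases s with
    | nil => simp [pvRep, pvScan]
    | cons c t =>
      have n2 : ¬ pvK2 <+: pvRep pvK1 pvV1 (c :: t) :=
        pv_nmp (by decide) (by decide) (by decide) (by decide) h1 h2
      have n3a : ¬ pvK3 <+: pvRep pvK1 pvV1 (c :: t) :=
        pv_nmp (by decide) (by decide) (by decide) (by decide) h1 h3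
      have n3 : ¬ pvK3 <+: pvRep pvK2 pvV2 (pvRep pvK1 pvV1 (c :: t)) :=
        pv_nmp (by decide) (by decide) (by decide) (by decide) n2 n3a
      have n4a : ¬ pvK4 <+: pvRep pvK1 pvV1 (c :: t) :=
        pv_nmp (by decide) (by decide) (by decide) (by decide) h1 h4
      have n4b : ¬ pvK4 <+: pvRep pvK2 pvV2 (pvRep pvK1 pvV1 (c :: t)) :=
        pv_nmp (by decide) (by decide) (by decide) (by decide) n2 n4a
      have n4 : ¬ pvK4 <+: pvRep pvK3 pvV3 (pvRep pvK2 pvV2 (pvRep pvK1 pvV1 (c :: t))) :=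
        pv_nmp (by decide) (by decide) (by decide) (by decide) n3 n4b
      rw [pv_cons pvV1 h1] at n2 n3 n3a n4 n4a n4b ⊢
      rw [pv_cons pvV2 n2] at n3 n4 n4b ⊢
      rw [pv_cons pvV3 n3] at n4 ⊢
      rw [pv_cons pvV4 n4, pvScan_cons, pvFind_none h1 h2 h3 h4,
        ih t (by simp at hs; omega)]

-- ===== VERDICT (by name: the statement is the Claim_ definition above) =====
theorem adapt_for_multiplayer_spec : Claim_equal_adapt_for_multiplayer := by
  intro dialogue group_size _
  unfold Spec_adapt_for_multiplayer adapt_for_multiplayer adapt_for_multiplayer_alt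
  by_cases h : group_size == 1
  · simp [h]
  · simp only [h, Bool.false_eq_true, if_false, List.foldl]
    rw [show ("You steady" : String) = String.ofList pvK1 from rfl,
      show ("Together, you steady" : String) = String.ofList pvV1 from rfl,
      show ("Your resolve" : String) = String.ofList pvK2 from rfl,
      show ("Your collective resolve" : String) = String.ofList pvV2 from rfl,
      show ("You feel" : String) = String.ofList pvK3 from rfl,
      show ("You all feel" : String) = String.ofList pvV3 from rfl,
      show ("Your courage" : String) = String.ofList pvK4 from rfl,
      show ("Your shared courage" : String) = String.ofList pvV4 from rfl]
    simp only [PySem.Str.replace, String.toList_ofList]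
    rw [pv_replace_eq _ _ _ (by decide), pv_replace_eq _ _ _ (by decide),
      pv_replace_eq _ _ _ (by decide), pv_replace_eq _ _ _ (by decide)]
    exact congrArg String.ofList (pv_main dialogue.toList)
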